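-- pv_equiv track=rewrite | github.com/VectorSophie/JoonPy | Python/백준/Bronze/1592. 영식이와 친구들/영식이와 친구들.py | balls
-- ===== SOURCE A (Python) =====
-- def balls(N, M, L):
--     cnt = [0] * N
--     current = 0
--     throws = 0
--
--     while True:
--         cnt[current] += 1
--         if cnt[current] == M:
--             break
--
--         if cnt[current] % 2 == 1:
--             current = (current + L) % N
--         else:
--             current = (current - L + N) % N
--         throws += 1
--     return throws
-- ===== SOURCE B (Python) =====
-- def balls(N, M, L):
--     # The walk visits the orbit {0, L, 2L, ...} mod N (size N // gcd(N, L)),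
--     # sweeping it once per "lap" (forward on odd counts, backward on even),
--     # and each lap raises every orbit position's count by exactly 1, starting
--     # from position 0.  Count M is therefore first reached at position 0 at
--     # the start of lap M, i.e. after (M - 1) full laps of throws.
--     a, b = N, L % N
--     while b:
--         a, b = b, a % b
--     return (M - 1) * (N // a)
-- ===== Notes on version B (the rewrite author's own statement) =====
-- stated objective: faster
-- what changed: B replaces the step-by-step simulation with a closed form: the walk sweeps the additive orbit of L mod N (length N // gcd(N, L)) once per lap, so the answer is (M-1) * (N // gcd(N, L)), computed with one Euclid gcd loop.
import Mathlib
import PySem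

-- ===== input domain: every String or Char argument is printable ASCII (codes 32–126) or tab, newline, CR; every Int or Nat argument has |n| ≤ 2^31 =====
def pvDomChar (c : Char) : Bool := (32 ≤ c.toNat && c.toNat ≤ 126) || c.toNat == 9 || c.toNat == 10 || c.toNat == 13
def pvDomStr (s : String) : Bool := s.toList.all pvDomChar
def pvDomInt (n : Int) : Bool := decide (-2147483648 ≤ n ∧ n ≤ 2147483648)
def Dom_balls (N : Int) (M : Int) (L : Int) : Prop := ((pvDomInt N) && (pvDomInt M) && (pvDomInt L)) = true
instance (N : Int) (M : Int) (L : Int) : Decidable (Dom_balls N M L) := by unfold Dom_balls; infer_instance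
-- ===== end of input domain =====

-- B replaces A's step-by-step O(N*M) simulation with the closed form (M-1) * (N // gcd(N, L)),
-- computed with one Euclid gcd loop.


-- ===== PORT A =====
-- the while-True loop of A; fuel is an upper bound on the iteration count (inside Pre_ the
-- loop breaks after (M-1)*(N/gcd(N,L)) + 1 ≤ N*M < fuel iterations, so fuel never runs out);
-- pyGet? = none (cnt[current] IndexError, i.e. N ≤ 0) returns junk 0, outside Pre_.
def ballsLoop (M N L : Int) (fuel : Nat) (cnt : List Int) (current throws : Int) : Int :=
  match fuel with
  | 0 => 0
  | fuel + 1 =>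
    match PySem.List.pyGet? cnt current with
    | none => 0
    | some v =>
      let cnt' := PySem.List.pySetD cnt current (v + 1)      -- cnt[current] += 1
      if v + 1 = M then throws
      else
        let current' := if PySem.Int.mod (v + 1) 2 = 1
                        then PySem.Int.mod (current + L) N
                        else PySem.Int.mod (current - L + N) N
        ballsLoop M N L fuel cnt' current' (throws + 1)

def balls (N : Int) (M : Int) (L : Int) : Int :=
  ballsLoop M N L (N.toNat * M.toNat + 1) (List.replicate N.toNat 0) 0 0

-- ===== PORT B =====
-- Euclid loop 'a, b = N, L % N; while b: a, b = b, a % b' of Source B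
def euclidI (a b : Int) : Int :=
  if hb : b = 0 then a else euclidI b (PySem.Int.mod a b)
termination_by b.natAbs
decreasing_by
  rcases lt_trichotomy b 0 with h | h | h
  · have hbd := PySem.Int.mod_neg_bounds (a := a) h
    omega
  · exact absurd h hb
  · have h1 := PySem.Int.mod_nonneg (a := a) h
    have h2 := PySem.Int.mod_lt (a := a) h
    omega

def balls_alt (N : Int) (M : Int) (L : Int) : Int :=
  let g := euclidI N (PySem.Int.mod L N)
  (M - 1) * PySem.Int.floordiv N g

-- ===== PRECONDITION & SPEC =====
-- Pre_ excludes N ≤ 0 (A raises IndexError on cnt[0]) and M ≤ 0 (A's loop never breaks).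
def Pre_balls (N : Int) (M : Int) (_L : Int) : Prop := 1 ≤ N ∧ 1 ≤ M
instance (N : Int) (M : Int) (L : Int) : Decidable (Pre_balls N M L) := by unfold Pre_balls; infer_instance
def pvWitness_balls : Int × Int × Int := (3, 2, 1)

def Spec_balls (N : Int) (M : Int) (L : Int) (out : Int) : Prop := out = balls_alt N M L
instance (N : Int) (M : Int) (L : Int) (out : Int) : Decidable (Spec_balls N M L out) := by unfold Spec_balls; infer_instance

-- ===== CLAIM (what is proved, stated in full; the proofs are below) =====
def Claim_equal_balls : Prop := ∀ (N : Int) (M : Int) (L : Int), Dom_balls N M L → Pre_balls N M L → Spec_balls N M L (balls N M L)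

-- ===== LEMMAS AND PROOFS =====

-- on nonnegative arguments, Source B's Euclid loop computes Nat.gcd
theorem euclidI_eq_aux : ∀ (n : Nat) (a b : Int), 0 ≤ a → 0 ≤ b → b.toNat ≤ n →
    euclidI a b = ((Nat.gcd b.toNat a.toNat : Nat) : Int) := by
  intro n
  induction n with
  | zero =>
    intro a b ha hb hn
    have hb0 : b = 0 := by omega
    subst hb0
    rw [euclidI.eq_def, dif_pos rfl]
    simp [Int.toNat_of_nonneg ha]
  | succ n ih =>
    intro a b ha hb hn
    by_cases h0 : b = 0
    · subst h0
      rw [euclidI.eq_def, dif_pos rfl]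
      simp [Int.toNat_of_nonneg ha]
    · have hbpos : 0 < b := by omega
      have hmnn : 0 ≤ PySem.Int.mod a b := PySem.Int.mod_nonneg _ hbpos
      have hmlt : PySem.Int.mod a b < b := PySem.Int.mod_lt _ hbpos
      rw [euclidI.eq_def, dif_neg h0, ih b (PySem.Int.mod a b) (by omega) hmnn (by omega)]
      have hmod : (PySem.Int.mod a b).toNat = a.toNat % b.toNat := by
        rw [PySem.Int.mod_eq_emod_of_pos hbpos]
        have h1 : a % b = ((a.toNat % b.toNat : Nat) : Int) := by
          conv_lhs => rw [← Int.toNat_of_nonneg ha, ← Int.toNat_of_nonneg (le_of_lt hbpos)]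
          exact_mod_cast rfl
        rw [h1, Int.toNat_natCast]
      rw [hmod]
      exact_mod_cast (Nat.gcd_rec b.toNat a.toNat).symm

theorem euclidI_eq (a b : Int) (ha : 0 ≤ a) (hb : 0 ≤ b) :
    euclidI a b = ((Nat.gcd b.toNat a.toNat : Nat) : Int) :=
  euclidI_eq_aux b.toNat a b ha hb le_rfl

-- position of the ball before throw t: lap j = t/k, in-lap step i = t%k;
-- even laps sweep the orbit forward (0, l, 2l, …), odd laps backward.
def posW (n l k t : Nat) : Nat :=
  if (t / k) % 2 = 0 then ((t % k) * l) % n else (((k - t % k) % k) * l) % n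

-- orbit index of posW (posW n l k t = (mIdx k t * l) % n)
def mIdx (k t : Nat) : Nat :=
  if (t / k) % 2 = 0 then t % k else (k - t % k) % k

-- the cnt list after t iterations of A's loop
def cntW (n l k : Nat) : Nat → List Int
  | 0 => List.replicate n 0
  | t + 1 => (cntW n l k t).set (posW n l k t) ((cntW n l k t).getD (posW n l k t) 0 + 1)

-- has orbit position m already been visited in lap j after in-lap step i?
def visitedW (k j i m : Nat) : Bool :=
  if j % 2 = 0 then decide (m < i) else decide (0 < i ∧ (m = 0 ∨ k - i < m))

-- lap step: after in-lap step i+1, exactly the current position mIdx has newly been visited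
theorem vis_step (k j i m : Nat) (hm : m < k) (hi1 : i + 1 < k) :
    visitedW k j (i + 1) m ↔ (m = (if j % 2 = 0 then i else (k - i) % k) ∨ visitedW k j i m) := by
  unfold visitedW
  by_cases hp : j % 2 = 0
  · simp only [if_pos hp, decide_eq_true_eq]; omega
  · simp only [if_neg hp, decide_eq_true_eq]
    rcases Nat.eq_zero_or_pos i with h0 | h0
    · subst h0
      simp only [Nat.sub_zero, Nat.mod_self]
      omega
    · rw [Nat.mod_eq_of_lt (show k - i < k by omega)]
      omega

-- at the last in-lap step i = k-1, every orbit position except the current one has been visited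
theorem vis_last (k j i m : Nat) (hk0 : 0 < k) (hm : m < k) (hik : i = k - 1)
    (hne : m ≠ (if j % 2 = 0 then i else (k - i) % k)) : visitedW k j i m := by
  subst hik
  unfold visitedW
  by_cases hp : j % 2 = 0
  · simp only [if_pos hp, decide_eq_true_eq] at hne ⊢; omega
  · simp only [if_neg hp, decide_eq_true_eq] at hne ⊢
    by_cases hk1 : k = 1
    · subst hk1; omega
    · have h3 : (k - (k - 1)) % k = k - (k - 1) := Nat.mod_eq_of_lt (by omega)
      rw [h3] at hne
      omega


theorem length_cntW (n l k t : Nat) : (cntW n l k t).length = n := by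
  induction t with
  | zero => simp [cntW]
  | succ t ih => simp [cntW, ih]

theorem posW_eq_mIdx (n l k t : Nat) : posW n l k t = (mIdx k t * l) % n := by
  unfold posW mIdx; split <;> rfl

theorem mIdx_lt (k t : Nat) (hk : 0 < k) : mIdx k t < k := by
  unfold mIdx; split
  · exact Nat.mod_lt _ hk
  · exact Nat.mod_lt _ hk

theorem posW_lt (n l k t : Nat) (hn : 0 < n) : posW n l k t < n := by
  rw [posW_eq_mIdx]; exact Nat.mod_lt _ hn

-- orbit injectivity: i ↦ (i*l) % n is injective on [0, k), k = n / gcd n l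
theorem orbit_inj (n l k : Nat) (hn : 0 < n) (hk : k = n / Nat.gcd n l)
    (i1 i2 : Nat) (h1 : i1 < k) (h2 : i2 < k) (h : (i1 * l) % n = (i2 * l) % n) : i1 = i2 := by
  have hmod : i1 ≡ i2 [MOD k] := by
    rw [hk]; exact (Nat.ModEq.cancel_right_div_gcd hn h)
  have := hmod.eq_of_lt_of_lt h1 h2
  exact this

-- the current position has not yet been visited in its lap
theorem visitedW_mIdx_false (k t : Nat) (hk : 0 < k) : ¬ visitedW k (t / k) (t % k) (mIdx k t) := by
  unfold visitedW mIdx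
  have hi : t % k < k := Nat.mod_lt _ hk
  split
  · simp only [decide_eq_true_eq]; omega
  · rcases Nat.eq_zero_or_pos (t % k) with h0 | h0
    · simp [h0]
    · have : (k - t % k) % k = k - t % k := Nat.mod_eq_of_lt (by omega)
      rw [this]; simp only [decide_eq_true_eq]; omega

-- characterization of the cnt list on the orbit
theorem cntW_getD (n l k : Nat) (hn : 0 < n) (hk : k = n / Nat.gcd n l)
    (hk0 : 0 < k) :
    ∀ t m, m < k →
      (cntW n l k t).getD ((m * l) % n) 0
        = ((t / k : Nat) : Int) + (if visitedW k (t / k) (t % k) m then 1 else 0) := by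
  intro t
  induction t with
  | zero =>
    intro m hm
    have : (m * l) % n < n := Nat.mod_lt _ hn
    simp [cntW, visitedW, List.getD_eq_getElem?_getD, this,
      Nat.zero_div, Nat.zero_mod]
  | succ t ih =>
    intro m hm
    have hi : t % k < k := Nat.mod_lt _ hk0
    set j := t / k with hj
    set i := t % k with hji
    have hti : t = k * j + i := (Nat.div_add_mod t k).symm ▸ by omega
    have hm0lt : mIdx k t < k := mIdx_lt k t hk0
    have hnv : ¬ visitedW k j i (mIdx k t) := by
      rw [hj, hji]; exact visitedW_mIdx_false k t hk0
    have hval : (cntW n l k t).getD (posW n l k t) 0 = (j : Int) := by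
      rw [posW_eq_mIdx, ih (mIdx k t) hm0lt, if_neg hnv]; simp
    have hlen : (cntW n l k t).length = n := length_cntW n l k t
    have hplt : posW n l k t < n := posW_lt n l k t hn
    have hmlt : (m * l) % n < n := Nat.mod_lt _ hn
    -- value at query position after the set
    have hset : (cntW n l k (t+1)).getD ((m * l) % n) 0
        = if (m * l) % n = posW n l k t then (j : Int) + 1
          else (cntW n l k t).getD ((m * l) % n) 0 := by
      show ((cntW n l k t).set (posW n l k t) _).getD _ _ = _
      rw [hval]
      by_cases hq : (m * l) % n = posW n l k t
      · rw [if_pos hq, hq, List.getD_eq_getElem?_getD, List.getElem?_set_self (by omega)]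
        simp
      · rw [if_neg hq, List.getD_eq_getElem?_getD, List.getElem?_set_ne (by omega),
          ← List.getD_eq_getElem?_getD]
    have hqiff : (m * l) % n = posW n l k t ↔ m = mIdx k t := by
      rw [posW_eq_mIdx]
      constructor
      · intro h; exact orbit_inj n l k hn hk m (mIdx k t) hm hm0lt h
      · intro h; rw [h]
    rw [hset]
    -- now case split on lap rollover
    rcases Nat.lt_or_ge (i + 1) k with hroll | hroll
    · -- same lap: (t+1)/k = j, (t+1)%k = i+1
      have hdiv : (t + 1) / k = j := by
        rw [hti, show k * j + i + 1 = i + 1 + j * k by ring]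
        rw [Nat.add_mul_div_right _ _ hk0, Nat.div_eq_of_lt hroll]; omega
      have hmod2 : (t + 1) % k = i + 1 := by
        rw [hti, show k * j + i + 1 = i + 1 + j * k by ring]
        rw [Nat.add_mul_mod_self_right, Nat.mod_eq_of_lt hroll]
      rw [hdiv, hmod2]
      -- visitedW k j (i+1) m ↔ (m = mIdx k t ∨ visitedW k j i m)
      have hmi : mIdx k t = (if j % 2 = 0 then i else (k - i) % k) := by
        unfold mIdx; rw [← hj, ← hji]
      have hvis : visitedW k j (i + 1) m ↔ (m = mIdx k t ∨ visitedW k j i m) := by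
        rw [hmi]; exact vis_step k j i m hm hroll
      by_cases hq : m = mIdx k t
      · rw [if_pos (hqiff.mpr hq), if_pos (hvis.mpr (Or.inl hq))]
      · rw [if_neg (fun h => hq (hqiff.mp h)), ih m hm]
        by_cases hv : visitedW k j i m
        · rw [if_pos hv, if_pos (hvis.mpr (Or.inr hv))]
        · rw [if_neg hv, if_neg (fun h => by rcases hvis.mp h with h | h; exact hq h; exact hv h)]
    · -- lap rollover: i = k - 1, (t+1)/k = j+1, (t+1)%k = 0
      have hik : i = k - 1 := by omega
      have ht1 : t + 1 = (j + 1) * k := by rw [hti]; ring_nf; omega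
      have hdiv : (t + 1) / k = j + 1 := by rw [ht1, Nat.mul_div_cancel _ hk0]
      have hmod2 : (t + 1) % k = 0 := by rw [ht1, Nat.mul_mod_left]
      rw [hdiv, hmod2]
      have hvis0 : ¬ visitedW k (j + 1) 0 m := by unfold visitedW; split <;> simp only [decide_eq_true_eq] <;> omega
      rw [if_neg hvis0]
      by_cases hq : m = mIdx k t
      · rw [if_pos (hqiff.mpr hq)]; push_cast; ring
      · rw [if_neg (fun h => hq (hqiff.mp h)), ih m hm]
        -- everyone except the current position was already visited in lap j at step i = k-1
        have hmi : mIdx k t = (if j % 2 = 0 then i else (k - i) % k) := by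
          unfold mIdx; rw [← hj, ← hji]
        rw [hmi] at hq
        have hv : visitedW k j i m := vis_last k j i m hk0 hm hik hq
        rw [if_pos hv]; push_cast; ring
  

-- value of the cnt list at the current position: lap number t/k
theorem cntW_getD_pos (n l k : Nat) (hn : 0 < n) (hk : k = n / Nat.gcd n l)
    (hk0 : 0 < k) (t : Nat) :
    (cntW n l k t).getD (posW n l k t) 0 = ((t / k : Nat) : Int) := by
  rw [posW_eq_mIdx, cntW_getD n l k hn hk hk0 t (mIdx k t) (mIdx_lt k t hk0),
    if_neg (visitedW_mIdx_false k t hk0)]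
  simp

-- arithmetic of t+1's lap/step indices
theorem mIdx_succ (k t : Nat) (hk0 : 0 < k) :
    mIdx k (t + 1) =
      if t % k + 1 < k then
        (if (t / k) % 2 = 0 then t % k + 1 else k - t % k - 1)
      else 0 := by
  have hi : t % k < k := Nat.mod_lt _ hk0
  have hdm : k * (t / k) + t % k = t := Nat.div_add_mod t k
  by_cases hroll : t % k + 1 < k
  · have h2 : t + 1 = k * (t / k) + (t % k + 1) := by omega
    have hdiv : (t + 1) / k = t / k := by
      rw [h2, Nat.mul_add_div hk0, Nat.div_eq_of_lt hroll]
      omega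
    have hmod : (t + 1) % k = t % k + 1 := by
      rw [h2, Nat.mul_add_mod, Nat.mod_eq_of_lt hroll]
    unfold mIdx
    rw [hdiv, hmod, if_pos hroll]
    by_cases hp : (t / k) % 2 = 0
    · rw [if_pos hp, if_pos hp]
    · rw [if_neg hp, if_neg hp, Nat.mod_eq_of_lt (by omega)]
      omega
  · have h3 : t + 1 = k * (t / k) + k := by
      have := Nat.mul_succ k (t / k)
      omega
    have hdiv : (t + 1) / k = t / k + 1 := by
      rw [h3, Nat.mul_add_div hk0, Nat.div_self hk0]
    have hmod : (t + 1) % k = 0 := by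
      rw [h3, Nat.mul_add_mod, Nat.mod_self]
    unfold mIdx
    rw [hdiv, hmod, if_neg hroll]
    by_cases hp : (t / k) % 2 = 0
    · rw [if_neg (by omega : ¬ (t / k + 1) % 2 = 0)]
      simp
    · rw [if_pos (by omega : (t / k + 1) % 2 = 0)]

-- the Int-side step of the position: exactly A's update expressions
theorem posW_succ_int (N L : Int) (n l k t : Nat)
    (hn0 : 0 < n) (hNn : ((n : Nat) : Int) = N) (hlL : ((l : Nat) : Int) = L % N) (hln : l < n)
    (hk0 : 0 < k) (hkl : n ∣ k * l) :
    ((posW n l k (t + 1) : Nat) : Int)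
      = if (t / k) % 2 = 0 then (((posW n l k t : Nat) : Int) + L) % N
        else (((posW n l k t : Nat) : Int) - L + N) % N := by
  have hN0 : (0 : Int) < N := by rw [← hNn]; exact_mod_cast hn0
  have key : ∀ a b : Int, 0 ≤ a → a < N → a ≡ b [ZMOD N] → a = b % N := by
    intro a b h0 h1 h
    have h' : a % N = b % N := h
    rw [← h', Int.emod_eq_of_lt h0 h1]
  have hmodc : ∀ x : Nat, (((x % n : Nat) : Int)) ≡ (x : Int) [ZMOD N] := by
    intro x
    show _ % _ = _ % _
    rw [← hNn]
    push_cast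
    rw [Int.emod_emod_of_dvd _ dvd_rfl]
  have hpos : ∀ s : Nat, ((posW n l k s : Nat) : Int) ≡ ((mIdx k s : Nat) : Int) * (l : Int) [ZMOD N] := by
    intro s
    rw [posW_eq_mIdx]
    have h := hmodc (mIdx k s * l)
    push_cast at h
    exact h
  have hL : ((l : Nat) : Int) ≡ L [ZMOD N] := by
    show _ % _ = _ % _
    rw [hlL, Int.emod_emod_of_dvd _ dvd_rfl]
  have hklZ : (N : Int) ∣ ((k : Nat) : Int) * (l : Int) := by
    rw [← hNn]
    exact_mod_cast Int.natCast_dvd_natCast.mpr hkl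
  have hposnn : (0 : Int) ≤ ((posW n l k (t + 1) : Nat) : Int) := Int.natCast_nonneg _
  have hposlt : ((posW n l k (t + 1) : Nat) : Int) < N := by
    rw [← hNn]; exact_mod_cast posW_lt n l k (t + 1) hn0
  have hi : t % k < k := Nat.mod_lt _ hk0
  have hmi : mIdx k t = (if (t / k) % 2 = 0 then t % k else (k - t % k) % k) := rfl
  have hms := mIdx_succ k t hk0
  by_cases hp : (t / k) % 2 = 0
  · rw [if_pos hp]
    apply key _ _ hposnn hposlt
    refine ((hpos (t + 1)).trans ?_).trans (Int.ModEq.add (hpos t).symm hL)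
    -- N ∣ (mIdx t * l + l) - mIdx (t+1) * l
    apply (Int.modEq_iff_dvd.mpr _)
    rw [hmi, if_pos hp, hms, if_pos hp]
    by_cases hroll : t % k + 1 < k
    · rw [if_pos hroll]
      have : (((t % k : Nat) : Int) * l + l) - ((t % k + 1 : Nat) : Int) * l = 0 := by
        push_cast; ring
      rw [this]
      exact dvd_zero N
    · rw [if_neg hroll]
      have hik : t % k = k - 1 := by omega
      have : (((t % k : Nat) : Int) * l + l) - ((0 : Nat) : Int) * l = ((k : Nat) : Int) * l := by
        rw [hik]
        have h1 : ((k - 1 : Nat) : Int) = (k : Int) - 1 := by omega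
        rw [h1]; push_cast; ring
      rw [this]
      exact hklZ
  · rw [if_neg hp]
    apply key _ _ hposnn hposlt
    have hmid : ((posW n l k t : Nat) : Int) - L + N ≡ ((mIdx k t : Nat) : Int) * l - l [ZMOD N] := by
      have h1 : ((posW n l k t : Nat) : Int) - L + N ≡ ((mIdx k t : Nat) : Int) * l - l + N [ZMOD N] :=
        Int.ModEq.add_right _ (Int.ModEq.sub (hpos t) hL.symm)
      refine h1.trans ?_
      apply Int.modEq_iff_dvd.mpr
      have : ((mIdx k t : Nat) : Int) * l - l - (((mIdx k t : Nat) : Int) * l - l + N) = -N := by ring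
      rw [this]
      exact dvd_neg.mpr dvd_rfl
    refine ((hpos (t + 1)).trans ?_).trans hmid.symm
    apply Int.modEq_iff_dvd.mpr
    rw [hmi, if_neg hp, hms, if_neg hp]
    by_cases hroll : t % k + 1 < k
    · rw [if_pos hroll]
      rcases Nat.eq_zero_or_pos (t % k) with h0 | h0
      · rw [h0]
        simp only [Nat.sub_zero, Nat.mod_self]
        have : (((0 : Nat) : Int) * l - l) - ((k - 1 : Nat) : Int) * l = -(((k : Nat) : Int) * l) := by
          have h1 : ((k - 1 : Nat) : Int) = (k : Int) - 1 := by omega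
          rw [h1]; push_cast; ring
        rw [this]
        exact dvd_neg.mpr hklZ
      · rw [Nat.mod_eq_of_lt (show k - t % k < k by omega)]
        have : (((k - t % k : Nat) : Int) * l - l) - ((k - t % k - 1 : Nat) : Int) * l = 0 := by
          have h1 : ((k - t % k : Nat) : Int) = (k : Int) - (t % k : Int) := by omega
          have h2 : ((k - t % k - 1 : Nat) : Int) = (k : Int) - (t % k : Int) - 1 := by omega
          rw [h1, h2]; ring
        rw [this]
        exact dvd_zero N
    · rw [if_neg hroll]
      have hik : t % k = k - 1 := by omega
      have hksub : k - t % k = 1 := by omega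
      rw [hksub]
      rcases Nat.eq_or_lt_of_le (show 1 ≤ k by omega) with hk1 | hk1
      · -- k = 1: l = 0 since n ∣ l and l < n
        have hdv : n ∣ l := by
          have h := hkl
          rw [← hk1] at h
          simpa using h
        have hl0 : l = 0 := Nat.eq_zero_of_dvd_of_lt hdv hln
        rw [hl0]
        simp
      · have h11 : 1 % k = 1 := Nat.mod_eq_of_lt hk1
        rw [h11]
        have : (((1 : Nat) : Int) * l - l) - ((0 : Nat) : Int) * l = 0 := by push_cast; ring
        rw [this]
        exact dvd_zero N

-- the main loop invariant: from the state after t iterations, A's loop returns (M-1)*k throws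
theorem loop_eq (N M L : Int) (n l k : Nat)
    (hN : 1 ≤ N) (hM : 1 ≤ M) (hn : ((n : Nat) : Int) = N) (hl : ((l : Nat) : Int) = PySem.Int.mod L N)
    (hk : k = n / Nat.gcd n l) :
    ∀ (fuel r t : Nat), t + r = (M - 1).toNat * k → r < fuel →
      ballsLoop M N L fuel (cntW n l k t) ((posW n l k t : Nat)) ((t : Nat) : Int)
        = (((M - 1).toNat * k : Nat) : Int) := by
  have hn0 : 0 < n := by
    by_contra h
    have : n = 0 := by omega
    rw [this] at hn
    omega
  have hlL : ((l : Nat) : Int) = L % N := by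
    rw [hl, PySem.Int.mod_eq_emod_of_pos (by omega)]
  have hln : l < n := by
    have h1 : L % N < N := Int.emod_lt_of_pos _ (by omega)
    have : ((l : Nat) : Int) < ((n : Nat) : Int) := by rw [hlL, hn]; exact h1
    exact_mod_cast this
  have hg0 : 0 < Nat.gcd n l := Nat.gcd_pos_of_pos_left _ hn0
  have hk0 : 0 < k := by
    rw [hk]
    exact Nat.div_pos (Nat.le_of_dvd hn0 (Nat.gcd_dvd_left n l)) hg0
  have hkl : n ∣ k * l := by
    obtain ⟨c, hc⟩ : Nat.gcd n l ∣ l := Nat.gcd_dvd_right n l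
    have h1 : k * Nat.gcd n l = n := by
      rw [hk]; exact Nat.div_mul_cancel (Nat.gcd_dvd_left n l)
    refine ⟨c, ?_⟩
    calc k * l = k * (Nat.gcd n l * c) := by conv_lhs => rw [hc]
      _ = (k * Nat.gcd n l) * c := by ring
      _ = n * c := by rw [h1]
  intro fuel
  induction fuel with
  | zero => intro r t _ h; omega
  | succ fuel ih =>
    intro r t hrt hrf
    have hplt : posW n l k t < n := posW_lt n l k t hn0
    have hlen : (cntW n l k t).length = n := length_cntW n l k t
    have hget : PySem.List.pyGet? (cntW n l k t) ((posW n l k t : Nat))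
        = some ((cntW n l k t).getD (posW n l k t) 0) := by
      rw [PySem.List.pyGet?_natCast, List.getD_eq_getElem?_getD,
        List.getElem?_eq_getElem (by rw [hlen]; exact hplt)]
      rfl
    have hval := cntW_getD_pos n l k hn0 hk hk0 t
    rw [ballsLoop, hget, hval]
    show (if ((t / k : Nat) : Int) + 1 = M then ((t : Nat) : Int)
      else
        ballsLoop M N L fuel
          (PySem.List.pySetD (cntW n l k t) ((posW n l k t : Nat)) (((t / k : Nat) : Int) + 1))
          (if PySem.Int.mod (((t / k : Nat) : Int) + 1) 2 = 1
            then PySem.Int.mod (((posW n l k t : Nat) : Int) + L) N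
            else PySem.Int.mod (((posW n l k t : Nat) : Int) - L + N) N)
          (((t : Nat) : Int) + 1)) = (((M - 1).toNat * k : Nat) : Int)
    rcases Nat.eq_zero_or_pos r with hr0 | hr0
    · -- break: t = (M-1).toNat * k, cnt[current] becomes M
      subst hr0
      have ht : t = (M - 1).toNat * k := by omega
      have hdivt : t / k = (M - 1).toNat := by rw [ht, Nat.mul_div_cancel _ hk0]
      have hMt : (((M - 1).toNat : Nat) : Int) = M - 1 := Int.toNat_of_nonneg (by omega)
      rw [hdivt]
      rw [if_pos (by omega : (((M - 1).toNat : Nat) : Int) + 1 = M), ht]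
    · -- continue
      have htlt : t < (M - 1).toNat * k := by omega
      have hdlt : t / k < (M - 1).toNat := (Nat.div_lt_iff_lt_mul hk0).mpr htlt
      have hMt : (((M - 1).toNat : Nat) : Int) = M - 1 := Int.toNat_of_nonneg (by omega)
      have hne : ¬ (((t / k : Nat) : Int) + 1 = M) := by
        have : ((t / k : Nat) : Int) < (((M - 1).toNat : Nat) : Int) := by exact_mod_cast hdlt
        omega
      rw [if_neg hne]
      have hsetc : PySem.List.pySetD (cntW n l k t) ((posW n l k t : Nat)) (((t / k : Nat) : Int) + 1)
          = cntW n l k (t + 1) := by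
        rw [PySem.List.pySetD_natCast]
        show _ = (cntW n l k t).set (posW n l k t) ((cntW n l k t).getD (posW n l k t) 0 + 1)
        rw [hval]
      have hparc : PySem.Int.mod (((t / k : Nat) : Int) + 1) 2 = (((t / k + 1) % 2 : Nat) : Int) := by
        have h1 : ((t / k : Nat) : Int) + 1 = ((t / k + 1 : Nat) : Int) := by push_cast; ring
        rw [h1]
        exact_mod_cast PySem.Int.mod_natCast (t / k + 1) 2
      have hcur : (if PySem.Int.mod (((t / k : Nat) : Int) + 1) 2 = 1
            then PySem.Int.mod (((posW n l k t : Nat) : Int) + L) N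
            else PySem.Int.mod (((posW n l k t : Nat) : Int) - L + N) N)
          = ((posW n l k (t + 1) : Nat) : Int) := by
        rw [hparc, posW_succ_int N L n l k t hn0 hn hlL hln hk0 hkl,
          PySem.Int.mod_eq_emod_of_pos (a := ((posW n l k t : Nat) : Int) + L) (by omega),
          PySem.Int.mod_eq_emod_of_pos (a := ((posW n l k t : Nat) : Int) - L + N) (by omega)]
        by_cases hp : (t / k) % 2 = 0
        · rw [if_pos hp, if_pos (by exact_mod_cast (by omega : ((t / k + 1) % 2 : Nat) = 1))]
        · rw [if_neg hp, if_neg (by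
            intro h
            have : ((t / k + 1) % 2 : Nat) = 1 := by exact_mod_cast h
            omega)]
      rw [hsetc, hcur]
      have hth : ((t : Nat) : Int) + 1 = ((t + 1 : Nat) : Int) := by push_cast; ring
      rw [hth]
      exact ih (r - 1) (t + 1) (by omega) (by omega)
-- ===== VERDICT (by name: the statement is the Claim_ definition above) =====
theorem balls_spec : Claim_equal_balls := by
  intro N M L _hDom hPre
  obtain ⟨hN, hM⟩ := hPre
  show balls N M L = balls_alt N M L
  have hn : ((N.toNat : Nat) : Int) = N := Int.toNat_of_nonneg (by omega)
  have hmodnn : (0 : Int) ≤ PySem.Int.mod L N := PySem.Int.mod_nonneg _ (by omega)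
  have hlc : (((PySem.Int.mod L N).toNat : Nat) : Int) = PySem.Int.mod L N :=
    Int.toNat_of_nonneg hmodnn
  set n := N.toNat with hndef
  set l := (PySem.Int.mod L N).toNat with hldef
  set g := Nat.gcd n l with hgdef
  set k := n / g with hkdef
  have hn0 : 0 < n := by omega
  have hg0 : 0 < g := Nat.gcd_pos_of_pos_left _ hn0
  have hkn : k ≤ n := Nat.div_le_self _ _
  have hcm : n * M.toNat = M.toNat * n := Nat.mul_comm _ _
  have hfuel : (M - 1).toNat * k < n * M.toNat + 1 := by
    have h1 : (M - 1).toNat ≤ M.toNat - 1 := by omega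
    have h2 : (M - 1).toNat * k ≤ (M.toNat - 1) * n := Nat.mul_le_mul h1 hkn
    have h3 : (M.toNat - 1) * n = M.toNat * n - 1 * n := Nat.sub_mul _ _ _
    have h4 : 1 * n = n := Nat.one_mul n
    omega
  have hloop := loop_eq N M L n l k hN hM hn hlc hkdef (n * M.toNat + 1)
    ((M - 1).toNat * k) 0 (by omega) hfuel
  have hpos0 : posW n l k 0 = 0 := by simp [posW]
  rw [hpos0] at hloop
  have hballs : balls N M L = (((M - 1).toNat * k : Nat) : Int) := by
    unfold balls
    exact_mod_cast hloop
  have halt : balls_alt N M L = (M - 1) * ((k : Nat) : Int) := by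
    simp only [balls_alt]
    have hg' : euclidI N (PySem.Int.mod L N) = ((g : Nat) : Int) := by
      rw [euclidI_eq N (PySem.Int.mod L N) (by omega) hmodnn, Nat.gcd_comm]
    rw [hg']
    rw [PySem.Int.floordiv_eq_ediv_of_pos (by exact_mod_cast hg0), ← hn]
    have hdivc : ((n : Nat) : Int) / ((g : Nat) : Int) = ((k : Nat) : Int) := by
      rw [hkdef]
      exact_mod_cast (Int.natCast_div n g).symm
    rw [hdivc]
  rw [hballs, halt]
  have hMt : (((M - 1).toNat : Nat) : Int) = M - 1 := by omega
  rw [Nat.cast_mul, hMt]
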